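-- pv_equiv track=rewrite | github.com/xubintao/OBE-and-DGO | mask_rcnn/postprocessing.py | find_duplicate_indices
-- ===== SOURCE A (Python) =====
-- def find_duplicate_indices(lst):
--     duplicates_index = {}
--     for index, item in enumerate(lst):
--         if item not in duplicates_index:
--             duplicates_index[item] = [index]
--         else:
--             duplicates_index[item].append(index)
--     # 返回只有重复元素及其索引的字典
--     return {k: v for k, v in duplicates_index.items() if len(v) > 1}
-- ===== SOURCE B (Python) =====
-- def find_duplicate_indices(lst):
--     result = {}
--     for i, x in enumerate(lst):
--         if x not in lst[:i] and lst.count(x) > 1: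
--             result[x] = [j for j, y in enumerate(lst) if y == x]
--     return result
-- ===== Notes on version B (the rewrite author's own statement) =====
-- stated objective: alternative
-- what changed: Replaces the incremental dict-grouping pass (accumulate every index list, then filter by length) with a dict-free brute-force scan: for each first occurrence whose total count exceeds 1, the full index list is rebuilt by a direct comprehension over the whole list; trades O(n) hashing for O(n^2) scanning.
import Mathlib
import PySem

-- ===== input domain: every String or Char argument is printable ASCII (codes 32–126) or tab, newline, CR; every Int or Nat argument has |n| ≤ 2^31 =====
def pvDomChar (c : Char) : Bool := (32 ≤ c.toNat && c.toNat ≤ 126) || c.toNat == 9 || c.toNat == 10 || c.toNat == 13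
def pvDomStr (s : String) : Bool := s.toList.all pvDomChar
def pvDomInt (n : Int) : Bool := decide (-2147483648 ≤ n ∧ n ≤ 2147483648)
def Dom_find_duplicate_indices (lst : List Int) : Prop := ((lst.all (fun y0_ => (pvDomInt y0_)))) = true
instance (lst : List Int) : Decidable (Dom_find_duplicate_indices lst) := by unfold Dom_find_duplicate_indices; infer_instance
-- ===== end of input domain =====

-- B drops A's incremental dict-grouping entirely: at each first occurrence whose total count
-- exceeds 1 it rebuilds the whole index list by a direct scan (quadratic, dict-free grouping);
-- same return value as A, which accumulates every index list in a dict and filters by length.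

-- ===== PORT A =====
-- loop body of A: if item not in d: d[item] = [index] else: d[item].append(index)
def pvStepA (d : PySem.Dict Int (List Int)) (p : Int × Int) : PySem.Dict Int (List Int) :=
  if d.contains p.2 = false then d.insert p.2 [p.1]
  else d.insert p.2 (d.getD p.2 [] ++ [p.1])   -- list.append on the stored list = overwrite in place

def find_duplicate_indices (lst : List Int) : List (Int × List Int) :=
  ((PySem.List.enumerate lst).foldl pvStepA PySem.Dict.empty).items.filter
    (fun kv => decide (1 < PySem.List.len kv.2))

-- ===== PORT B =====
-- the comprehension [j for j, y in enumerate(lst) if y == k]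
def pvIdxAll (lst : List Int) (k : Int) : List Int :=
  ((PySem.List.enumerate lst).filter (fun q => q.2 == k)).map (·.1)

-- loop body of B: if x not in lst[:i] and lst.count(x) > 1: result[x] = [j for j, y in enumerate(lst) if y == x]
def pvStepB (lst : List Int) (d : PySem.Dict Int (List Int)) (p : Int × Int) :
    PySem.Dict Int (List Int) :=
  if (PySem.List.slice lst (some 0) (some p.1)).contains p.2 = false
      ∧ 1 < PySem.List.count lst p.2
  then d.insert p.2 (pvIdxAll lst p.2)
  else d

def find_duplicate_indices_alt (lst : List Int) : List (Int × List Int) :=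
  ((PySem.List.enumerate lst).foldl (pvStepB lst) PySem.Dict.empty).items

-- ===== PRECONDITION & SPEC =====
def Spec_find_duplicate_indices (lst : List Int) (out : List (Int × List Int)) : Prop := out = find_duplicate_indices_alt lst
instance (lst : List Int) (out : List (Int × List Int)) : Decidable (Spec_find_duplicate_indices lst out) := by unfold Spec_find_duplicate_indices; infer_instance

-- ===== CLAIM (what is proved, stated in full; the proofs are below) =====
def Claim_equal_find_duplicate_indices : Prop := ∀ (lst : List Int), Dom_find_duplicate_indices lst → Spec_find_duplicate_indices lst (find_duplicate_indices lst)

-- ===== LEMMAS AND PROOFS =====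

theorem pvStepA_eq_modify (d : PySem.Dict Int (List Int)) (p : Int × Int) :
    pvStepA d p = d.modify p.2 [] (· ++ [p.1]) := by
  by_cases h : d.contains p.2 = false
  · simp [pvStepA, h, PySem.Dict.modify,
      PySem.Dict.getD_of_not_contains d [] (by simpa using h)]
  · simp [pvStepA, h, PySem.Dict.modify]

theorem pvStepA_nodup (d : PySem.Dict Int (List Int)) (p : Int × Int)
    (h : d.keys.Nodup) : (pvStepA d p).keys.Nodup := by
  rw [pvStepA_eq_modify, PySem.Dict.modify]
  exact PySem.Dict.nodup_keys_insert _ _ _ h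

-- value of key k after A's loop over l: old value ++ the first components of l's pairs keyed k
theorem pvA_getD (l : List (Int × Int)) :
    ∀ (d : PySem.Dict Int (List Int)) (k : Int),
    (l.foldl pvStepA d).getD k [] =
      d.getD k [] ++ (l.filter (fun p => p.2 == k)).map (·.1) := by
  induction l with
  | nil => intro d k; simp
  | cons p t ih =>
    intro d k
    rw [List.foldl_cons, ih, pvStepA_eq_modify]
    by_cases hk : p.2 = k
    · subst hk
      rw [PySem.Dict.getD_modify_self]
      simp
    · rw [PySem.Dict.getD_modify_of_ne d [] _ (fun h => hk h.symm)]
      simp [hk]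

theorem pvA_nodup (l : List (Int × Int)) :
    ∀ (d : PySem.Dict Int (List Int)), d.keys.Nodup → (l.foldl pvStepA d).keys.Nodup := by
  induction l with
  | nil => intro d h; exact h
  | cons p t ih => intro d h; exact ih _ (pvStepA_nodup d p h)

-- the invariant: B's dict = A's dict restricted to globally duplicated keys, every value the
-- full index list; pre is the already-processed prefix of lst
theorem pvMain (lst : List Int) (r : List Int) :
    ∀ (pre : List Int) (dA dB : PySem.Dict Int (List Int)),
    pre ++ r = lst →
    dA.keys.Nodup →
    (∀ y, y ∈ dA.keys ↔ y ∈ pre) →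
    dB.items = (dA.items.filter (fun kv => decide (1 < PySem.List.count lst kv.1))).map
      (fun kv => (kv.1, pvIdxAll lst kv.1)) →
    ((PySem.List.enumerate r (pre.length : Int)).foldl (pvStepB lst) dB).items
      = (((PySem.List.enumerate r (pre.length : Int)).foldl pvStepA dA).items.filter
          (fun kv => decide (1 < PySem.List.count lst kv.1))).map
          (fun kv => (kv.1, pvIdxAll lst kv.1)) := by
  induction r with
  | nil => intro pre dA dB _ _ _ hit; simpa [PySem.List.enumerate] using hit
  | cons x t ih =>
    intro pre dA dB hpre hnd hkeys hit
    rw [PySem.List.enumerate_cons, List.foldl_cons, List.foldl_cons]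
    have hslice : PySem.List.slice lst (some 0) (some (pre.length : Int)) = pre := by
      rw [PySem.List.slice_zero_start, PySem.List.slice_to_natCast, ← hpre, List.take_left]
    have hpre' : (pre ++ [x]) ++ t = lst := by simpa using hpre
    have hlen' : (((pre ++ [x]).length : Nat) : Int) = (pre.length : Int) + 1 := by
      simp
    by_cases hx : x ∈ pre
    · -- x already seen: A updates its list, B skips
      have hcA : dA.contains x = true := by
        rw [PySem.Dict.contains_eq_decide_mem_keys]
        simpa using (hkeys x).mpr hx
      have hB : pvStepB lst dB ((pre.length : Int), x) = dB := by
        simp [pvStepB, hslice, hx]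
      have hA : pvStepA dA ((pre.length : Int), x)
          = dA.insert x (dA.getD x [] ++ [(pre.length : Int)]) := by
        simp [pvStepA, hcA]
      rw [hB, hA]
      have := ih (pre ++ [x]) (dA.insert x (dA.getD x [] ++ [(pre.length : Int)])) dB hpre'
        (PySem.Dict.nodup_keys_insert dA x _ hnd)
        (by
          intro y
          rw [PySem.Dict.mem_keys_insert]
          constructor
          · rintro (rfl | hy)
            · simp [hx]
            · simp [(hkeys y).mp hy]
          · intro hy
            rcases List.mem_append.mp hy with hy | hy
            · exact Or.inr ((hkeys y).mpr hy)
            · exact Or.inl (by simpa using hy))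
        (by
          rw [PySem.Dict.items_insert_of_contains dA _ hcA, List.filter_map]
          have hpg : ((fun kv : Int × List Int => decide (1 < PySem.List.count lst kv.1)) ∘
              (fun p : Int × List Int =>
                if p.1 == x then (x, dA.getD x [] ++ [(pre.length : Int)]) else p))
              = (fun kv : Int × List Int => decide (1 < PySem.List.count lst kv.1)) := by
            funext q
            by_cases hq : (q.1 == x) = true
            · simp [Function.comp, eq_of_beq hq]
            · simp [Function.comp, hq]
          rw [hpg, List.map_map]
          have hvg : ((fun kv : Int × List Int => (kv.1, pvIdxAll lst kv.1)) ∘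
              (fun p : Int × List Int =>
                if p.1 == x then (x, dA.getD x [] ++ [(pre.length : Int)]) else p))
              = (fun kv : Int × List Int => (kv.1, pvIdxAll lst kv.1)) := by
            funext q
            by_cases hq : (q.1 == x) = true
            · simp [Function.comp, eq_of_beq hq]
            · simp [Function.comp, hq]
          rw [hvg, hit])
      rw [hlen'] at this
      exact this
    · -- x unseen so far: A appends a fresh singleton group, B appends the full list iff count > 1
      have hcA : dA.contains x = false := by
        rw [PySem.Dict.contains_eq_decide_mem_keys]
        simpa using fun h => hx ((hkeys x).mp h)
      have hA : pvStepA dA ((pre.length : Int), x) = dA.insert x [(pre.length : Int)] := by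
        simp [pvStepA, hcA]
      have hAitems : (dA.insert x [(pre.length : Int)]).items
          = dA.items ++ [(x, [(pre.length : Int)])] :=
        PySem.Dict.items_insert_of_not_contains dA _ hcA
      have hkeys' : ∀ y, y ∈ (dA.insert x [(pre.length : Int)]).keys ↔ y ∈ pre ++ [x] := by
        intro y
        rw [PySem.Dict.mem_keys_insert]
        constructor
        · rintro (rfl | hy)
          · simp
          · simp [(hkeys y).mp hy]
        · intro hy
          rcases List.mem_append.mp hy with hy | hy
          · exact Or.inr ((hkeys y).mpr hy)
          · exact Or.inl (by simpa using hy)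
      rw [hA]
      by_cases hc : 1 < PySem.List.count lst x
      · -- duplicated value: B records the full index list now
        have hc' : 1 < List.count x lst := by simpa [PySem.List.count_eq] using hc
        have hcB : dB.contains x = false := by
          rw [PySem.Dict.contains_eq_decide_mem_keys]
          simp only [decide_eq_false_iff_not]
          intro hyB
          apply hx
          apply (hkeys x).mp
          simp only [PySem.Dict.keys, hit, List.map_map, List.mem_map] at hyB
          rcases hyB with ⟨q, hq, hk⟩
          simp only [PySem.Dict.keys, List.mem_map]
          exact ⟨q, List.mem_of_mem_filter hq, by simpa using hk⟩
        have hB : pvStepB lst dB ((pre.length : Int), x)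
            = dB.insert x (pvIdxAll lst x) := by
          simp [pvStepB, hslice, hx, PySem.List.count_eq, hc']
        rw [hB]
        have := ih (pre ++ [x]) (dA.insert x [(pre.length : Int)])
          (dB.insert x (pvIdxAll lst x)) hpre'
          (PySem.Dict.nodup_keys_insert dA x _ hnd) hkeys'
          (by
            rw [PySem.Dict.items_insert_of_not_contains dB _ hcB, hAitems,
              List.filter_append, List.map_append, hit]
            simp [PySem.List.count_eq, hc'])
        rw [hlen'] at this
        exact this
      · -- unique value: B skips it, the final filter will drop A's singleton group
        have hc' : ¬ 1 < List.count x lst := by simpa [PySem.List.count_eq] using hc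
        have hB : pvStepB lst dB ((pre.length : Int), x) = dB := by
          simp [pvStepB, PySem.List.count_eq, hc']
        rw [hB]
        have := ih (pre ++ [x]) (dA.insert x [(pre.length : Int)]) dB hpre'
          (PySem.Dict.nodup_keys_insert dA x _ hnd) hkeys'
          (by
            rw [hAitems, List.filter_append, List.map_append, hit]
            simp [PySem.List.count_eq, hc'])
        rw [hlen'] at this
        exact this

-- ===== VERDICT (by name: the statement is the Claim_ definition above) =====
theorem find_duplicate_indices_spec : Claim_equal_find_duplicate_indices := by
  intro lst _
  unfold Spec_find_duplicate_indices find_duplicate_indices find_duplicate_indices_alt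
  have hmain := pvMain lst lst [] PySem.Dict.empty PySem.Dict.empty rfl
    PySem.Dict.nodup_keys_empty (by simp [PySem.Dict.keys, PySem.Dict.empty])
    (by simp [PySem.Dict.empty])
  have h0 : ((([] : List Int)).length : Int) = 0 := rfl
  rw [h0] at hmain
  rw [hmain]
  have hnd := pvA_nodup (PySem.List.enumerate lst) PySem.Dict.empty PySem.Dict.nodup_keys_empty
  have hval : ∀ kv ∈ ((PySem.List.enumerate lst).foldl pvStepA PySem.Dict.empty).items,
      kv.2 = pvIdxAll lst kv.1 := by
    intro kv hkv
    have hv := PySem.Dict.getD_of_mem_items _ (show (kv.1, kv.2) ∈ _ from hkv) hnd []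
    rw [pvA_getD] at hv
    simpa [pvIdxAll, PySem.Dict.getD_empty] using hv.symm
  have hlen : ∀ k : Int, (pvIdxAll lst k).length = lst.count k := by
    intro k
    have hm : lst.count k = ((PySem.List.enumerate lst).map (·.2)).count k := by
      rw [PySem.List.map_snd_enumerate]
    rw [pvIdxAll, List.length_map, hm, List.count_eq_countP, List.countP_map,
      List.countP_eq_length_filter]
    simp [Function.comp_def]
  rw [List.filter_congr (fun kv hkv => ?_)]
  · exact (List.map_congr_left (fun kv hkv => by
      simp [← hval kv (List.mem_of_mem_filter hkv)])).trans (List.map_id _) |>.symm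
  · simp only [PySem.List.len_eq, hval kv hkv, PySem.List.count_eq, hlen kv.1]
    simp
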